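-- pv_equiv track=rewrite | github.com/otu165/Algorithm | python/PG_49189.py | bfs
-- ===== SOURCE A (Python) =====
-- from collections import deque
--
-- def bfs(graph, n):
--     q = deque()
--     q.append((1, 0))  # 시작노드, 거리
--
--     visited = [-1 for x in range(n + 1)]
--     visited[1] = 0
--
--     while q:
--         x, d = q.popleft()
--
--         for i in graph[x]:
--             if visited[i] == -1:
--                 visited[i] = d + 1
--                 q.append((i, d + 1))
--
--     max_val = max(visited)
--     return visited.count(max_val)
-- ===== SOURCE B (Python) =====
-- def bfs(graph, n):
--     # Level-order BFS: keep the current frontier; the answer is the size of the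
--     # last non-empty level, so no final max/count pass over visited is needed.
--     visited = [-1 for _ in range(n + 1)]
--     visited[1] = 0
--     frontier = [1]
--     d = 0
--     while True:
--         nxt = []
--         for x in frontier:
--             for i in graph[x]:
--                 if visited[i] == -1:
--                     visited[i] = d + 1
--                     nxt.append(i)
--         if not nxt:
--             return len(frontier)
--         frontier = nxt
--         d += 1
-- ===== Notes on version B (the rewrite author's own statement) =====
-- stated objective: alternative
-- what changed: Replaces the deque of (node,distance) pairs plus a final max-then-count pass over the visited array by a level-order BFS that keeps whole frontier lists and returns the size of the last non-empty frontier directly.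
-- outside the precondition, e.g. on bfs({1: [-1]}, 1): A returns 1, B returns 1
import Mathlib
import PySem

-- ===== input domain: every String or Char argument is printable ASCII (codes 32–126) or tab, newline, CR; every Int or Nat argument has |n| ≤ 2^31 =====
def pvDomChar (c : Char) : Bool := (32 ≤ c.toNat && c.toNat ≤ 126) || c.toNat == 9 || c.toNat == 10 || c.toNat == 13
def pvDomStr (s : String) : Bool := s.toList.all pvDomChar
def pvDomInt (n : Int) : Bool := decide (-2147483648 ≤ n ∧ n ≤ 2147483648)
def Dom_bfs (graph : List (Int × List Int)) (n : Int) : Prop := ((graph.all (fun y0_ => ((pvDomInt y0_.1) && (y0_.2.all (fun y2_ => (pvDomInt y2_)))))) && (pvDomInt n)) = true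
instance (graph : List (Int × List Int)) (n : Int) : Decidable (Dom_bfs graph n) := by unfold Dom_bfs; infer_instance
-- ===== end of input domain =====

-- B replaces A's deque of (node,distance) pairs and final max/count pass by a level-order
-- BFS returning the size of the last non-empty frontier (objective: alternative decomposition).

-- graph[x]  (dict lookup; Python raises KeyError on a missing key — excluded by Pre_)
def pvNbrs (g : List (Int × List Int)) (x : Int) : List Int :=
  (PySem.Dict.ofList g).getD x []

-- helper facts the ports' own termination proofs cite (they stay above the claim block for that reason)
theorem pv_count_set_of_getElem? (l : List Int) (j : Nat) (a : Int) (hj : l[j]? = some a)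
    (w y : Int) :
    (l.set j w).count y + (if a = y then 1 else 0) = l.count y + (if w = y then 1 else 0) := by
  induction l generalizing j with
  | nil => simp at hj
  | cons b t ih =>
    cases j with
    | zero =>
      simp at hj
      subst hj
      simp [List.count_cons]
      omega
    | succ j =>
      simp at hj
      have := ih j hj
      simp [List.count_cons, List.set]
      omega

theorem pv_pySetD_spec (v : List Int) (i : Int) (a : Int)
    (h : PySem.List.pyGet? v i = some a) (w : Int) :
    ∃ j : Nat, v[j]? = some a ∧ PySem.List.pySetD v i w = v.set j w := by
  simp only [PySem.List.pyGet?, PySem.List.pyIdx?] at h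
  simp only [PySem.List.pySetD, PySem.List.pySet?, PySem.List.pyIdx?]
  rcases ht : (if 0 ≤ i then if i < (v.length : Int) then some i.toNat else none
      else if -(v.length : Int) ≤ i then some (v.length - (-i).toNat) else none) with _ | k
  · rw [ht] at h; simp at h
  · rw [ht] at h
    simp at h
    exact ⟨k, h, by simp⟩

theorem pv_count_pySetD (v : List Int) (i a w y : Int)
    (h : PySem.List.pyGet? v i = some a) :
    (PySem.List.pySetD v i w).count y + (if a = y then 1 else 0)
      = v.count y + (if w = y then 1 else 0) := by
  obtain ⟨j, hj, hset⟩ := pv_pySetD_spec v i a h w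
  rw [hset]
  exact pv_count_set_of_getElem? v j a hj w y

-- ===== PORT A =====
-- the inner 'for i in graph[x]' loop of A: appends (i, d+1) to the queue and marks visited
def stepA (d : Nat) : List Int → List (Int × Nat) → List Int → List (Int × Nat) × List Int
  | [], q, v => (q, v)
  | i :: is, q, v =>
    if PySem.List.pyGet? v i = some (-1) then
      stepA d is (q ++ [(i, d + 1)]) (PySem.List.pySetD v i ((d : Int) + 1))
    else stepA d is q v

theorem stepA_sum (d : Nat) (is : List Int) (q : List (Int × Nat)) (v : List Int) :
    (stepA d is q v).2.count (-1) + (stepA d is q v).1.length = v.count (-1) + q.length := by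
  induction is generalizing q v with
  | nil => simp [stepA]
  | cons i is ih =>
    simp only [stepA]
    split
    · rename_i hget
      have hc := pv_count_pySetD v i (-1) ((d : Int) + 1) (-1) hget
      have := ih (q ++ [(i, d + 1)]) (PySem.List.pySetD v i ((d : Int) + 1))
      have hne : ¬((d : Int) + 1 = -1) := by omega
      simp [hne] at hc this ⊢
      omega
    · exact ih q v

theorem stepA_len (d : Nat) (is : List Int) (q : List (Int × Nat)) (v : List Int) :
    q.length ≤ (stepA d is q v).1.length := by
  induction is generalizing q v with
  | nil => simp [stepA]
  | cons i is ih =>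
    simp only [stepA]
    split
    · have := ih (q ++ [(i, d + 1)]) (PySem.List.pySetD v i ((d : Int) + 1))
      simp at this
      omega
    · exact ih q v

-- A's 'while q' loop
def loopA (g : List (Int × List Int)) : List (Int × Nat) → List Int → List Int
  | [], v => v
  | (x, d) :: rest, v =>
    let p := stepA d (pvNbrs g x) rest v
    loopA g p.1 p.2
termination_by q v => 2 * v.count (-1) + q.length
decreasing_by
  have h1 := stepA_sum d (pvNbrs g x) rest v
  have h2 := stepA_len d (pvNbrs g x) rest v
  simp only [List.length_cons]
  omega

-- A's tail: max_val = max(visited); return visited.count(max_val)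
-- (max() on an empty list raises ValueError in Python — such inputs are outside Pre_)
def pvFin (v : List Int) : Int :=
  match PySem.List.max? v (fun x => x) with
  | none => 0
  | some m => (PySem.List.count v m : Int)

def bfs (graph : List (Int × List Int)) (n : Int) : Int :=
  let visited0 : List Int := (PySem.List.pyRange 0 (n + 1) 1).map (fun _ => (-1 : Int))
  let visited1 := PySem.List.pySetD visited0 1 0
  pvFin (loopA graph [(1, 0)] visited1)

-- ===== PORT B =====
-- the inner 'for i in graph[x]' loop of B: appends i to the next frontier and marks visited
def stepB (d : Nat) : List Int → List Int → List Int → List Int × List Int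
  | [], nxt, v => (nxt, v)
  | i :: is, nxt, v =>
    if PySem.List.pyGet? v i = some (-1) then
      stepB d is (nxt ++ [i]) (PySem.List.pySetD v i ((d : Int) + 1))
    else stepB d is nxt v

theorem stepB_sum (d : Nat) (is : List Int) (nxt : List Int) (v : List Int) :
    (stepB d is nxt v).2.count (-1) + (stepB d is nxt v).1.length
      = v.count (-1) + nxt.length := by
  induction is generalizing nxt v with
  | nil => simp [stepB]
  | cons i is ih =>
    simp only [stepB]
    split
    · rename_i hget
      have hc := pv_count_pySetD v i (-1) ((d : Int) + 1) (-1) hget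
      have := ih (nxt ++ [i]) (PySem.List.pySetD v i ((d : Int) + 1))
      have hne : ¬((d : Int) + 1 = -1) := by omega
      simp [hne] at hc this ⊢
      omega
    · exact ih nxt v

-- B's 'for x in frontier' loop building the next frontier
def expand (g : List (Int × List Int)) (d : Nat) :
    List Int → List Int → List Int → List Int × List Int
  | [], nxt, v => (nxt, v)
  | x :: fs, nxt, v =>
    let p := stepB d (pvNbrs g x) nxt v
    expand g d fs p.1 p.2

theorem expand_sum (g : List (Int × List Int)) (d : Nat) (fs nxt v : List Int) :
    (expand g d fs nxt v).2.count (-1) + (expand g d fs nxt v).1.length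
      = v.count (-1) + nxt.length := by
  induction fs generalizing nxt v with
  | nil => simp [expand]
  | cons x fs ih =>
    simp only [expand]
    have h1 := stepB_sum d (pvNbrs g x) nxt v
    have := ih (stepB d (pvNbrs g x) nxt v).1 (stepB d (pvNbrs g x) nxt v).2
    omega

-- B's 'while True' loop
def loopB (g : List (Int × List Int)) : List Int → List Int → Nat → Int
  | front, v, d =>
    let p := expand g d front [] v
    if p.1 = [] then (front.length : Int) else loopB g p.1 p.2 (d + 1)
termination_by front v d => v.count (-1)
decreasing_by
  have h := expand_sum g d front [] v
  rename_i hne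
  have : (expand g d front [] v).1.length ≠ 0 := by
    simpa [List.length_eq_zero_iff] using hne
  simp only [List.length_nil] at h
  omega

def bfs_alt (graph : List (Int × List Int)) (n : Int) : Int :=
  let visited0 : List Int := (PySem.List.pyRange 0 (n + 1) 1).map (fun _ => (-1 : Int))
  let visited1 := PySem.List.pySetD visited0 1 0
  loopB graph [1] visited1 0

-- ===== PRECONDITION & SPEC =====
-- one step of the neighbour closure on the input graph (a shape condition on the input,
-- independent of the ports' visited arrays / distances / counts)
def pvStep (g : List (Int × List Int)) (R : List Int) : List Int :=
  R ++ (g.flatMap (fun p => if p.1 ∈ R then p.2 else [])).filter (fun i => ¬ i ∈ R)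

-- all nodes connected to 1 through keys of g (stable as a set after g.length+1 rounds)
def pvReach (g : List (Int × List Int)) : List Int :=
  (pvStep g)^[g.length + 1] [1]

-- Pre_ asks n ≥ 1 (else visited[1] = 0 raises IndexError) and that every node in the neighbour
-- closure of 1 is a key of graph whose listed neighbours are in-range indices of visited; this
-- is where A returns without KeyError/IndexError.  It slightly over-approximates the marked set:
-- a closure node whose visited slot was already taken by an aliasing index is excluded even
-- though A still returns (see claim.json cites).
def Pre_bfs (graph : List (Int × List Int)) (n : Int) : Prop :=
  1 ≤ n ∧
    ∀ x ∈ pvReach graph, (PySem.Dict.ofList graph).contains x = true ∧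
      ∀ i ∈ (PySem.Dict.ofList graph).getD x [], -(n + 1) ≤ i ∧ i ≤ n
instance (graph : List (Int × List Int)) (n : Int) : Decidable (Pre_bfs graph n) := by
  unfold Pre_bfs; infer_instance

def pvWitness_bfs : (List (Int × List Int)) × Int := ([(1, [2]), (2, [1])], 2)

def Spec_bfs (graph : List (Int × List Int)) (n : Int) (out : Int) : Prop := out = bfs_alt graph n
instance (graph : List (Int × List Int)) (n : Int) (out : Int) : Decidable (Spec_bfs graph n out) := by unfold Spec_bfs; infer_instance

-- ===== CLAIM (what is proved, stated in full; the proofs are below) =====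
def Claim_equal_bfs : Prop := ∀ (graph : List (Int × List Int)) (n : Int), Dom_bfs graph n → Pre_bfs graph n → Spec_bfs graph n (bfs graph n)

-- ===== LEMMAS AND PROOFS =====

theorem pv_mem_pySetD (v : List Int) (i a w b : Int)
    (h : PySem.List.pyGet? v i = some a) (hb : b ∈ PySem.List.pySetD v i w) :
    b ∈ v ∨ b = w := by
  obtain ⟨j, hj, hset⟩ := pv_pySetD_spec v i a h w
  rw [hset] at hb
  exact List.mem_or_eq_of_mem_set hb


-- proof-side intermediate: B's level loop, but ending with A's max/count tail
def loopL (g : List (Int × List Int)) : List Int → List Int → Nat → Int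
  | front, v, d =>
    let p := expand g d front [] v
    if p.1 = [] then pvFin p.2 else loopL g p.1 p.2 (d + 1)
termination_by front v d => v.count (-1)
decreasing_by
  have h := expand_sum g d front [] v
  rename_i hne
  have : (expand g d front [] v).1.length ≠ 0 := by
    simpa [List.length_eq_zero_iff] using hne
  simp only [List.length_nil] at h
  omega

theorem stepB_count_other (d : Nat) (is nxt v : List Int) (y : Int)
    (hy1 : y ≠ -1) (hy2 : y ≠ (d : Int) + 1) :
    (stepB d is nxt v).2.count y = v.count y := by
  induction is generalizing nxt v with
  | nil => simp [stepB]
  | cons i is ih =>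
    simp only [stepB]
    split
    · rename_i hget
      have hc := pv_count_pySetD v i (-1) ((d : Int) + 1) y hget
      rw [if_neg (fun h => hy1 h.symm), if_neg (fun h => hy2 h.symm)] at hc
      rw [ih (nxt ++ [i]) (PySem.List.pySetD v i ((d : Int) + 1))]
      omega
    · exact ih nxt v

theorem stepB_count_level (d : Nat) (is nxt v : List Int) :
    (stepB d is nxt v).2.count ((d : Int) + 1) + nxt.length
      = v.count ((d : Int) + 1) + (stepB d is nxt v).1.length := by
  induction is generalizing nxt v with
  | nil => simp [stepB]
  | cons i is ih =>
    simp only [stepB]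
    split
    · rename_i hget
      have hc := pv_count_pySetD v i (-1) ((d : Int) + 1) ((d : Int) + 1) hget
      rw [if_neg (by omega : ¬(-1 : Int) = (d : Int) + 1), if_pos rfl] at hc
      have := ih (nxt ++ [i]) (PySem.List.pySetD v i ((d : Int) + 1))
      simp only [List.length_append, List.length_cons, List.length_nil] at this ⊢
      omega
    · exact ih nxt v

theorem stepB_mem (d : Nat) (is nxt v : List Int) (b : Int)
    (hb : b ∈ (stepB d is nxt v).2) : b ∈ v ∨ b = (d : Int) + 1 := by
  induction is generalizing nxt v with
  | nil => simpa [stepB] using Or.inl hb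
  | cons i is ih =>
    simp only [stepB] at hb
    split at hb
    · rename_i hget
      rcases ih _ _ hb with h | h
      · exact (pv_mem_pySetD v i (-1) ((d : Int) + 1) b hget h).imp_left id
      · exact Or.inr h
    · exact ih _ _ hb

theorem expand_count_other (g : List (Int × List Int)) (d : Nat) (fs nxt v : List Int) (y : Int)
    (hy1 : y ≠ -1) (hy2 : y ≠ (d : Int) + 1) :
    (expand g d fs nxt v).2.count y = v.count y := by
  induction fs generalizing nxt v with
  | nil => simp [expand]
  | cons x fs ih =>
    simp only [expand]
    rw [ih, stepB_count_other d (pvNbrs g x) nxt v y hy1 hy2]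

theorem expand_count_level (g : List (Int × List Int)) (d : Nat) (fs nxt v : List Int) :
    (expand g d fs nxt v).2.count ((d : Int) + 1) + nxt.length
      = v.count ((d : Int) + 1) + (expand g d fs nxt v).1.length := by
  induction fs generalizing nxt v with
  | nil => simp [expand]
  | cons x fs ih =>
    simp only [expand]
    have h1 := stepB_count_level d (pvNbrs g x) nxt v
    have h2 := ih (stepB d (pvNbrs g x) nxt v).1 (stepB d (pvNbrs g x) nxt v).2
    omega

theorem expand_mem (g : List (Int × List Int)) (d : Nat) (fs nxt v : List Int) (b : Int)
    (hb : b ∈ (expand g d fs nxt v).2) : b ∈ v ∨ b = (d : Int) + 1 := by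
  induction fs generalizing nxt v with
  | nil => simpa [expand] using Or.inl hb
  | cons x fs ih =>
    simp only [expand] at hb
    rcases ih _ _ hb with h | h
    · exact stepB_mem d (pvNbrs g x) nxt v b h
    · exact Or.inr h

-- A's inner loop is B's inner loop with each new frontier node paired with its distance
theorem stepAB (d : Nat) (is : List Int) (base : List (Int × Nat)) (nxt v : List Int) :
    stepA d is (base ++ nxt.map (fun i => (i, d + 1))) v
      = (base ++ ((stepB d is nxt v).1.map (fun i => (i, d + 1))), (stepB d is nxt v).2) := by
  induction is generalizing nxt v with
  | nil => simp [stepA, stepB]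
  | cons i is ih =>
    simp only [stepA, stepB]
    split
    · rename_i hget
      have := ih (nxt ++ [i]) (PySem.List.pySetD v i ((d : Int) + 1))
      simpa [List.map_append, List.append_assoc] using this
    · exact ih nxt v

-- A's FIFO queue always holds the rest of level d followed by the accumulated level d+1:
-- running A's loop from such a state is running the level loop
theorem loopA_levels (g : List (Int × List Int)) (c : Nat) :
    ∀ (v : List Int) (d : Nat) (front acc : List Int),
    2 * v.count (-1) + front.length + 2 * acc.length ≤ c →
    pvFin (loopA g (front.map (fun x => (x, d)) ++ acc.map (fun x => (x, d + 1))) v)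
      = (let p := expand g d front acc v;
         if p.1 = [] then pvFin p.2 else loopL g p.1 p.2 (d + 1)) := by
  induction c with
  | zero =>
    intro v d front acc hm
    have hf : front = [] := by cases front <;> simp_all
    have ha : acc = [] := by cases acc <;> simp_all
    subst hf; subst ha
    simp [loopA, expand]
  | succ c ih =>
    intro v d front acc hm
    cases front with
    | cons x fs =>
      have hsh : ((x :: fs).map (fun x => (x, d)) ++ acc.map (fun x => (x, d + 1)))
          = (x, d) :: (fs.map (fun x => (x, d)) ++ acc.map (fun x => (x, d + 1))) := by simp
      rw [hsh, loopA]
      have hAB := stepAB d (pvNbrs g x) (fs.map (fun x => (x, d))) acc v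
      simp only [hAB]
      have hsum := stepB_sum d (pvNbrs g x) acc v
      rw [ih _ d fs (stepB d (pvNbrs g x) acc v).1
        (by simp only [List.length_cons] at hm ⊢; omega)]
      simp only [expand]
    | nil =>
      cases acc with
      | nil => simp [loopA, expand]
      | cons a as =>
        have hsh : (([] : List Int).map (fun x => (x, d)) ++ (a :: as).map (fun x => (x, d + 1)))
            = ((a :: as).map (fun x => (x, d + 1)) ++ ([] : List Int).map (fun x => (x, d + 1 + 1))) := by
          simp
        rw [hsh, ih v (d + 1) (a :: as) []
          (by simp only [List.length_cons, List.length_nil] at hm ⊢; omega)]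
        have hL : loopL g (a :: as) v (d + 1)
            = (let p := expand g (d + 1) (a :: as) [] v;
               if p.1 = [] then pvFin p.2 else loopL g p.1 p.2 (d + 1 + 1)) := by
          rw [loopL]
        rw [← hL]
        simp [expand]

-- when no new node is marked, max(visited) is the current level d and its count is |frontier|
theorem pvFin_level (g : List (Int × List Int)) (d : Nat) (front v : List Int)
    (hne : front ≠ []) (hcnt : v.count ((d : Int)) = front.length)
    (hall : ∀ a ∈ v, a ≤ (d : Int))
    (hp : (expand g d front [] v).1 = []) :
    pvFin (expand g d front [] v).2 = (front.length : Int) := by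
  have hd1 : v.count ((d : Int) + 1) = 0 :=
    List.count_eq_zero.mpr (fun hmem => by have := hall _ hmem; omega)
  have hlvl := expand_count_level g d front [] v
  rw [hp] at hlvl
  simp only [List.length_nil] at hlvl
  have hd1' : (expand g d front [] v).2.count ((d : Int) + 1) = 0 := by omega
  have hd : (expand g d front [] v).2.count ((d : Int)) = front.length := by
    rw [expand_count_other g d front [] v ((d : Int)) (by omega) (by omega)]
    exact hcnt
  have hdmem : ((d : Int)) ∈ (expand g d front [] v).2 := by
    rw [← List.count_pos_iff, hd]
    have := List.length_pos_iff.mpr hne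
    omega
  cases hmax : PySem.List.max? (expand g d front [] v).2 (fun x => x) with
  | none =>
    rw [PySem.List.max?_eq_none_iff] at hmax
    rw [hmax] at hdmem
    simp at hdmem
  | some m =>
    have hmm := PySem.List.max?_mem hmax
    have hisMax := PySem.List.max?_isMax hmax
    have hmd : m = (d : Int) := by
      have h1 : (d : Int) ≤ m := hisMax _ hdmem
      have h2 : m ≤ (d : Int) := by
        rcases expand_mem g d front [] v m hmm with h | h
        · exact hall _ h
        · exfalso
          rw [h] at hmm
          rw [← List.count_pos_iff] at hmm
          omega
      omega
    unfold pvFin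
    rw [hmax, hmd]
    show (PySem.List.count (expand g d front [] v).2 ((d : Int)) : Int) = (front.length : Int)
    rw [PySem.List.count_eq, hd]

-- with the level invariant, A's max/count tail counts exactly the last non-empty frontier
theorem loopL_eq_loopB (g : List (Int × List Int)) (c : Nat) :
    ∀ (v : List Int) (d : Nat) (front : List Int),
    v.count (-1) ≤ c → front ≠ [] → v.count ((d : Int)) = front.length →
    (∀ a ∈ v, a ≤ (d : Int)) →
    loopL g front v d = loopB g front v d := by
  induction c with
  | zero =>
    intro v d front hc hne hcnt hall
    rw [loopL, loopB]
    have hs := expand_sum g d front [] v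
    have hp : (expand g d front [] v).1 = [] := by
      have : (expand g d front [] v).1.length = 0 := by
        simp only [List.length_nil] at hs; omega
      simpa [List.length_eq_zero_iff] using this
    rw [if_pos hp, if_pos hp]
    exact pvFin_level g d front v hne hcnt hall hp
  | succ c ih =>
    intro v d front hc hne hcnt hall
    rw [loopL, loopB]
    by_cases hp : (expand g d front [] v).1 = []
    · rw [if_pos hp, if_pos hp]
      exact pvFin_level g d front v hne hcnt hall hp
    · rw [if_neg hp, if_neg hp]
      have hs := expand_sum g d front [] v
      simp only [List.length_nil] at hs
      have hlen : (expand g d front [] v).1.length ≠ 0 := by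
        simpa [List.length_eq_zero_iff] using hp
      have hlvl := expand_count_level g d front [] v
      simp only [List.length_nil] at hlvl
      have hd1 : v.count ((d : Int) + 1) = 0 :=
        List.count_eq_zero.mpr (fun hmem => by have := hall _ hmem; omega)
      refine ih _ _ _ (by omega) hp ?_ ?_
      · have : (((d + 1 : Nat) : Int)) = (d : Int) + 1 := by push_cast; ring
        rw [this]
        omega
      · intro a ha
        rcases expand_mem g d front [] v a ha with h | h
        · have := hall a h; push_cast; omega
        · push_cast; omega

-- ===== VERDICT (by name: the statement is the Claim_ definition above) =====
theorem bfs_spec : Claim_equal_bfs := by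
  intro graph n _dom hpre
  obtain ⟨hn, -⟩ := hpre
  show bfs graph n = bfs_alt graph n
  unfold bfs bfs_alt
  have hrange : PySem.List.pyRange 0 (n + 1) 1 = 0 :: 1 :: PySem.List.pyRange 2 (n + 1) 1 := by
    rw [PySem.List.pyRange_one_cons (by omega : (0 : Int) < n + 1)]
    rw [show (0 : Int) + 1 = 1 from rfl]
    rw [PySem.List.pyRange_one_cons (by omega : (1 : Int) < n + 1)]
    norm_num
  rw [hrange]
  simp only [List.map_cons]
  set rest := (PySem.List.pyRange 2 (n + 1) 1).map (fun _ => (-1 : Int)) with hrest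
  have hv1 : PySem.List.pySetD (-1 :: -1 :: rest) 1 0 = -1 :: 0 :: rest := by
    have hlt : (1 : Int) < ((-1 :: -1 :: rest : List Int).length : Int) := by
      simp
    norm_num [PySem.List.pySetD, PySem.List.pySet?, PySem.List.pyIdx?, hlt]
  rw [hv1]
  have hrestmem : ∀ a ∈ rest, a = (-1 : Int) := by
    intro a ha
    rw [hrest] at ha
    simp only [List.mem_map] at ha
    obtain ⟨_, -, h⟩ := ha
    omega
  have hcnt : (-1 :: 0 :: rest).count (((0 : Nat) : Int)) = ([1] : List Int).length := by
    have h0 : rest.count (0 : Int) = 0 :=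
      List.count_eq_zero.mpr (fun hmem => by have := hrestmem _ hmem; omega)
    simp [h0]
  have hall : ∀ a ∈ (-1 :: 0 :: rest), a ≤ (((0 : Nat) : Int)) := by
    intro a ha
    simp only [List.mem_cons] at ha
    rcases ha with h | h | h
    · omega
    · omega
    · have := hrestmem _ h; omega
  have hq : [((1 : Int), (0 : Nat))]
      = ([1] : List Int).map (fun x => (x, (0 : Nat))) ++ ([] : List Int).map (fun x => (x, 1)) := by
    simp
  rw [hq, loopA_levels graph (2 * (-1 :: 0 :: rest).count (-1) + 1) (-1 :: 0 :: rest) 0 [1] []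
    (by simp)]
  have hL : loopL graph [1] (-1 :: 0 :: rest) 0
      = (let p := expand graph 0 [1] [] (-1 :: 0 :: rest);
         if p.1 = [] then pvFin p.2 else loopL graph p.1 p.2 (0 + 1)) := by
    rw [loopL]
  rw [← hL]
  exact loopL_eq_loopB graph ((-1 :: 0 :: rest).count (-1)) (-1 :: 0 :: rest) 0 [1]
    (le_refl _) (by simp) hcnt hall
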